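-- pv_equiv track=rewrite | github.com/LukaszDygon/wordplay-solver | wordplay_solver.py | parse_letter_input
-- ===== SOURCE A (Python) =====
-- from typing import Dict, Optional, List, Set, Tuple
--
-- STANDARD_LETTER_VALUES = {
--     'a': 1, 'b': 3, 'c': 3, 'd': 2, 'e': 1, 'f': 4, 'g': 2, 'h': 4,
--     'i': 1, 'j': 8, 'k': 5, 'l': 1, 'm': 3, 'n': 1, 'o': 1, 'p': 3,
--     'q': 10, 'r': 1, 's': 1, 't': 1, 'u': 1, 'v': 4, 'w': 4, 'x': 8,
--     'y': 4, 'z': 10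
-- }
--
-- def parse_letter_input(letter_str: str) -> Dict[str, int]:
--     """Parse input string with optional custom letter values."""
--     letters = {}
--     i = 0
--     n = len(letter_str)
--
--     while i < n:
--         if not letter_str[i].isalpha():
--             i += 1
--             continue
--
--         char = letter_str[i].lower()
--         i += 1
--
--         # Check if next characters form a number
--         num_str = ''
--         while i < n and letter_str[i].isdigit():
--             num_str += letter_str[i]
--             i += 1
--
--         value = int(num_str) if num_str else STANDARD_LETTER_VALUES.get(char, 1)
--         letters[char] = value
--
--     return letters
-- ===== SOURCE B (Python) =====
-- from itertools import groupby
--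
-- STANDARD_LETTER_VALUES = {
--     'a': 1, 'b': 3, 'c': 3, 'd': 2, 'e': 1, 'f': 4, 'g': 2, 'h': 4,
--     'i': 1, 'j': 8, 'k': 5, 'l': 1, 'm': 3, 'n': 1, 'o': 1, 'p': 3,
--     'q': 10, 'r': 1, 's': 1, 't': 1, 'u': 1, 'v': 4, 'w': 4, 'x': 8,
--     'y': 4, 'z': 10
-- }
--
-- def _kind(c):
--     if c.isalpha():
--         return 'alpha'
--     if c.isdigit():
--         return 'digit'
--     return 'other'
--
-- def parse_letter_input(letter_str):
--     """Parse input string with optional custom letter values."""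
--     runs = [(k, ''.join(g)) for k, g in groupby(letter_str, key=_kind)]
--     letters = {}
--     for idx, (kind, chars) in enumerate(runs):
--         if kind != 'alpha':
--             continue
--         for c in chars[:-1]:
--             letters[c.lower()] = STANDARD_LETTER_VALUES.get(c.lower(), 1)
--         last = chars[-1].lower()
--         if idx + 1 < len(runs) and runs[idx + 1][0] == 'digit':
--             letters[last] = int(runs[idx + 1][1])
--         else:
--             letters[last] = STANDARD_LETTER_VALUES.get(last, 1)
--     return letters
-- ===== Notes on version B (the rewrite author's own statement) =====
-- stated objective: alternative
-- what changed: B replaces A's index-walking while loop (with an inner digit-collecting while) by an itertools.groupby pass that materializes alpha/digit/other runs and then assigns values per run, attaching a digit run to the last letter of the preceding alpha run.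
import Mathlib
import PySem

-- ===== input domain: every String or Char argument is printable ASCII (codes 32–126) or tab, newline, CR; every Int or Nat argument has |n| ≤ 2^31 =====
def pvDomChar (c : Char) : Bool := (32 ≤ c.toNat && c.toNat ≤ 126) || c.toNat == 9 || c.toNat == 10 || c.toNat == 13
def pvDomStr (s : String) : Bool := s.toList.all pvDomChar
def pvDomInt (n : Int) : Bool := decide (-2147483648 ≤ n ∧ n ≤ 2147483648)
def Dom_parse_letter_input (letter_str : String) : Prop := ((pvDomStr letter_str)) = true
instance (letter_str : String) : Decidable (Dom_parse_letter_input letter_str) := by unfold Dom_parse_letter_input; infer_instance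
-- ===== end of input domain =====

-- B re-parses the string as itertools.groupby runs (alpha/digit/other) instead of A's index-walking
-- while loop — an alternative decomposition of the same parse; return values proved equal.

-- shared module constant STANDARD_LETTER_VALUES
def pvStd : PySem.Dict String Int := PySem.Dict.ofList
  [("a", 1), ("b", 3), ("c", 3), ("d", 2), ("e", 1), ("f", 4), ("g", 2), ("h", 4),
   ("i", 1), ("j", 8), ("k", 5), ("l", 1), ("m", 3), ("n", 1), ("o", 1), ("p", 3),
   ("q", 10), ("r", 1), ("s", 1), ("t", 1), ("u", 1), ("v", 4), ("w", 4), ("x", 8),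
   ("y", 4), ("z", 10)]

-- STANDARD_LETTER_VALUES.get(ch, 1)
def pvStdVal (ch : String) : Int := pvStd.getD ch 1

-- int(num_str): always applied to a nonempty all-digit run, on which ofChars? is some (default unreachable)
def pvNum (cs : List Char) : Int := (PySem.Int.ofChars? cs).getD 0

-- ===== PORT A =====
-- the while loop of A: one step per character; the inner digit-collecting while is the
-- takeWhile/dropWhile pair over the same characters
def pvLoopA : List Char → PySem.Dict String Int → PySem.Dict String Int
  | [], d => d
  | c :: rest, d =>
    if ¬ (PySem.Chars.isalpha c = true) then pvLoopA rest d
    else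
      let ch := String.ofList [PySem.Chars.lowerChar c]
      let num := rest.takeWhile PySem.Chars.isdigit
      let rest' := rest.dropWhile PySem.Chars.isdigit
      let value := if num ≠ [] then pvNum num else pvStdVal ch
      pvLoopA rest' (d.insert ch value)
termination_by cs => cs.length
decreasing_by
  · simp
  · have := List.length_dropWhile_le PySem.Chars.isdigit rest
    simp; omega

def parse_letter_input (letter_str : String) : List (String × Int) :=
  (pvLoopA letter_str.toList PySem.Dict.empty).items

-- ===== PORT B =====
-- _kind(c)
def pvKind (c : Char) : String :=
  if PySem.Chars.isalpha c then "alpha" else if PySem.Chars.isdigit c then "digit" else "other"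

-- itertools.groupby(letter_str, key=_kind), materialized as (kind, chars) runs
def pvGroupRuns : List Char → List (String × List Char)
  | [] => []
  | c :: rest =>
    let k := pvKind c
    (k, c :: rest.takeWhile (fun x => pvKind x == k)) ::
      pvGroupRuns (rest.dropWhile (fun x => pvKind x == k))
termination_by cs => cs.length
decreasing_by
  have := List.length_dropWhile_le (fun x => pvKind x == pvKind c) rest
  simp; omega

-- the for-loop over enumerate(runs); the lookahead runs[idx+1] is the head of the remaining runs
def pvProcB : List (String × List Char) → PySem.Dict String Int → PySem.Dict String Int
  | [], d => d
  | (kind, chars) :: rest, d =>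
    if kind ≠ "alpha" then pvProcB rest d
    else
      let d1 := (PySem.List.slice chars none (some (-1))).foldl
        (fun acc c =>
          let ch := String.ofList [PySem.Chars.lowerChar c]
          acc.insert ch (pvStdVal ch)) d
      let last := String.ofList [PySem.Chars.lowerChar (PySem.List.pyGetD chars (-1) 'a')]
      let d2 := match rest with
        | (k2, cs2) :: _ =>
          if k2 == "digit" then d1.insert last (pvNum cs2) else d1.insert last (pvStdVal last)
        | [] => d1.insert last (pvStdVal last)
      pvProcB rest d2

def parse_letter_input_alt (letter_str : String) : List (String × Int) :=
  (pvProcB (pvGroupRuns letter_str.toList) PySem.Dict.empty).items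

-- ===== PRECONDITION & SPEC =====
def Spec_parse_letter_input (letter_str : String) (out : List (String × Int)) : Prop := out = parse_letter_input_alt letter_str
instance (letter_str : String) (out : List (String × Int)) : Decidable (Spec_parse_letter_input letter_str out) := by unfold Spec_parse_letter_input; infer_instance

-- ===== CLAIM (what is proved, stated in full; the proofs are below) =====
def Claim_equal_parse_letter_input : Prop := ∀ (letter_str : String), Dom_parse_letter_input letter_str → Spec_parse_letter_input letter_str (parse_letter_input letter_str)

-- ===== LEMMAS AND PROOFS =====

-- ASCII letters and decimal digits are disjoint (true for every Char under PySem's definitions)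
lemma pv_alpha_not_digit (c : Char) (h : PySem.Chars.isalpha c = true) :
    PySem.Chars.isdigit c = false := by
  simp [PySem.Chars.isalpha, PySem.Chars.isupper, PySem.Chars.islower, Char.le_def,
    UInt32.le_iff_toNat_le] at h
  simp only [PySem.Chars.isdigit, Char.le_def, Bool.and_eq_false_iff,
    decide_eq_false_iff_not, UInt32.le_iff_toNat_le]
  have h0 : ('0' : Char).val.toNat = 48 := by decide
  have h9 : ('9' : Char).val.toNat = 57 := by decide
  have hc : c.val.toNat = c.toNat := rfl
  omega

lemma pv_kind_digit (c : Char) : (pvKind c == "digit") = PySem.Chars.isdigit c := by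
  by_cases ha : PySem.Chars.isalpha c = true
  · simp [pvKind, ha, pv_alpha_not_digit c ha]
  · by_cases hd : PySem.Chars.isdigit c = true
    · simp [pvKind, ha, hd]
    · simp [pvKind, ha, hd]

-- a non-alpha run at the front is skipped
lemma pv_skip (k : String) (cs : List Char) (rs : List (String × List Char))
    (hk : k ≠ "alpha") (d : PySem.Dict String Int) :
    pvProcB ((k, cs) :: rs) d = pvProcB rs d := by
  simp [pvProcB, hk]

-- chars[:-1] is dropLast
lemma pv_slice_dropLast {α : Type} (cs : List α) :
    PySem.List.slice cs none (some (-1)) = cs.dropLast := by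
  rw [List.dropLast_eq_take]
  simp only [PySem.List.slice, PySem.List.clampIdx]
  cases cs with
  | nil => simp
  | cons c cs =>
    simp only [List.length_cons, List.drop_zero]
    congr 1
    split_ifs <;> omega

-- peel the first letter of an alpha run with at least two letters
lemma pv_peel (c x : Char) (xs : List Char) (rs : List (String × List Char))
    (d : PySem.Dict String Int) :
    pvProcB (("alpha", c :: x :: xs) :: rs) d =
      pvProcB (("alpha", x :: xs) :: rs)
        (d.insert (String.ofList [PySem.Chars.lowerChar c])
          (pvStdVal (String.ofList [PySem.Chars.lowerChar c]))) := by
  have hne : (x :: xs) ≠ ([] : List Char) := by simp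
  simp only [pvProcB, pv_slice_dropLast, ne_eq, not_true_eq_false, if_false,
    List.dropLast_cons₂, List.foldl_cons]
  have hlast : PySem.List.pyGetD (c :: x :: xs) (-1) 'a' = PySem.List.pyGetD (x :: xs) (-1) 'a' := by
    simp [PySem.List.pyGetD, PySem.List.pyGet?, PySem.List.pyIdx?]
    congr 1
  simp only [hlast]

-- main loop correspondence: processing the groupby runs equals A's character walk
lemma pv_main : ∀ (n : Nat) (cs : List Char) (d : PySem.Dict String Int), cs.length ≤ n →
    pvProcB (pvGroupRuns cs) d = pvLoopA cs d := by
  intro n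
  induction n with
  | zero =>
    intro cs d h
    have : cs = [] := by cases cs <;> simp_all
    subst this
    simp [pvGroupRuns, pvProcB, pvLoopA]
  | succ n ih =>
    intro cs d h
    match cs with
    | [] => simp [pvGroupRuns, pvProcB, pvLoopA]
    | c :: rest =>
      have hlen : rest.length ≤ n := by simpa using h
      by_cases ha : PySem.Chars.isalpha c = true
      · -- alpha head
        have hk : pvKind c = "alpha" := by simp [pvKind, ha]
        match rest with
        | [] =>
          simp [pvGroupRuns, pvProcB, pvLoopA, hk, ha, pv_slice_dropLast,
            PySem.List.pyGetD, PySem.List.pyGet?, PySem.List.pyIdx?]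
        | a :: rs =>
          by_cases hb : PySem.Chars.isalpha a = true
          · -- alpha run continues
            have hka : pvKind a = "alpha" := by simp [pvKind, hb]
            have hnd : PySem.Chars.isdigit a = false := pv_alpha_not_digit a hb
            rw [pvGroupRuns]
            simp only [hk, hka, List.takeWhile_cons, List.dropWhile_cons, beq_self_eq_true,
              if_true]
            rw [pv_peel]
            have hG : pvGroupRuns (a :: rs) =
                ("alpha", a :: rs.takeWhile (fun x => pvKind x == "alpha")) ::
                  pvGroupRuns (rs.dropWhile (fun x => pvKind x == "alpha")) := by
              rw [pvGroupRuns]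
              simp only [hka]
            rw [← hG, ih _ _ hlen]
            have : pvLoopA (c :: a :: rs) d =
                pvLoopA (a :: rs)
                  (d.insert (String.ofList [PySem.Chars.lowerChar c])
                    (pvStdVal (String.ofList [PySem.Chars.lowerChar c]))) := by
              rw [pvLoopA]
              simp [ha, hnd]
            rw [this]
          · -- alpha run of length one
            have hka : pvKind a ≠ "alpha" := by
              simp [pvKind, hb]; split_ifs <;> simp
            have hne : (pvKind a == pvKind c) = false := by
              rw [hk]; simpa using hka
            have hGr : pvGroupRuns (c :: a :: rs) = ("alpha", [c]) :: pvGroupRuns (a :: rs) := by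
              rw [pvGroupRuns]
              simp [List.takeWhile_cons, List.dropWhile_cons, hk]
              exact ⟨hka, by rw [if_neg hka]⟩
            rw [hGr]
            have hG : pvGroupRuns (a :: rs) =
                (pvKind a, a :: rs.takeWhile (fun x => pvKind x == pvKind a)) ::
                  pvGroupRuns (rs.dropWhile (fun x => pvKind x == pvKind a)) := by
              rw [pvGroupRuns]
            by_cases hd : PySem.Chars.isdigit a = true
            · -- digit run follows the single letter
              have hkd : pvKind a = "digit" := by simp [pvKind, hb, hd]
              have hpa : (fun x => pvKind x == "digit") = PySem.Chars.isdigit := by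
                funext x; exact pv_kind_digit x
              rw [pvProcB]
              simp only [hG, hpa, hkd, pv_slice_dropLast, ne_eq, not_true_eq_false, if_false,
                beq_self_eq_true, if_true]
              rw [pv_skip _ _ _ (by decide)]
              have hdl : (rs.dropWhile PySem.Chars.isdigit).length ≤ n := by
                have := List.length_dropWhile_le PySem.Chars.isdigit rs
                simp at hlen; omega
              rw [ih _ _ hdl]
              conv_rhs => rw [pvLoopA]
              simp [ha, hd, PySem.List.pyGetD, PySem.List.pyGet?, PySem.List.pyIdx?]
            · -- 'other' run (or end) follows: standard value
              have hkd : (pvKind a == "digit") = false := by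
                simp [pvKind, hb, hd]
              rw [pvProcB]
              simp only [hG, hkd, pv_slice_dropLast, ne_eq, not_true_eq_false, if_false,
                Bool.false_eq_true]
              rw [← hG, ih _ _ hlen]
              conv_rhs => rw [pvLoopA]
              simp [ha, hd, PySem.List.pyGetD, PySem.List.pyGet?, PySem.List.pyIdx?]
      · -- non-alpha head: A skips one char, B's run is skipped wholesale
        have hk : pvKind c ≠ "alpha" := by
          simp [pvKind, ha]; split_ifs <;> simp
        rw [pvGroupRuns]
        rw [pv_skip _ _ _ (by simpa using hk)]
        rw [show pvLoopA (c :: rest) d = pvLoopA rest d by simp [pvLoopA, ha]]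
        rw [← ih rest d hlen]
        match rest with
        | [] => simp [List.dropWhile_nil]
        | a :: rs =>
          by_cases hsame : pvKind a = pvKind c
          · rw [pvGroupRuns]
            simp only [List.dropWhile_cons, if_pos (by simp [hsame] : (pvKind a == pvKind c) = true)]
            rw [pv_skip _ _ _ (by rw [hsame]; exact hk)]
            simp only [hsame]
          · simp only [List.dropWhile_cons,
              if_neg (by simpa using hsame : ¬ ((pvKind a == pvKind c) = true))]

-- ===== VERDICT (by name: the statement is the Claim_ definition above) =====
theorem parse_letter_input_spec : Claim_equal_parse_letter_input := by
  intro s _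
  unfold Spec_parse_letter_input parse_letter_input parse_letter_input_alt
  rw [pv_main s.toList.length s.toList PySem.Dict.empty le_rfl]
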